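-- pv_equiv track=rewrite | github.com/pypi-data/pypi-mirror-384 | packages/supy/supy-2025.10.15-cp313-cp313-win_amd64.whl/supy/data_model/validation/pipeline/phase_a.py | remove_extra_parameters_from_yaml
-- ===== SOURCE A (Python) =====
-- def remove_extra_parameters_from_yaml(yaml_content, extra_params):
--     """Remove extra parameters from YAML content for public mode."""
--     if not extra_params:
--         return yaml_content
--
--     lines = yaml_content.split("\n")
--     lines_to_remove = set()
--
--     # Convert extra_params paths to line numbers to remove
--     for param_path in extra_params:
--         param_name = param_path.split(".")[-1]
--
--         for i, line in enumerate(lines):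
--             stripped = line.strip()
--             if stripped.startswith(f"{param_name}:"):
--                 lines_to_remove.add(i)
--                 break
--
--     for line_num in sorted(lines_to_remove, reverse=True):
--         lines.pop(line_num)
--
--     return "\n".join(lines)
-- ===== SOURCE B (Python) =====
-- def remove_extra_parameters_from_yaml(yaml_content, extra_params):
--     """Remove extra parameters from YAML content for public mode."""
--     if not extra_params:
--         return yaml_content
--
--     remaining = {p.split(".")[-1] for p in extra_params}
--     kept = []
--     for line in yaml_content.split("\n"):
--         stripped = line.strip()
--         matched = {n for n in remaining if stripped.startswith(n + ":")}
--         if matched: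
--             remaining -= matched
--         else:
--             kept.append(line)
--     return "\n".join(kept)
-- ===== Notes on version B (the rewrite author's own statement) =====
-- stated objective: simpler
-- what changed: Replaces the per-parameter scan over all lines plus reverse-sorted index popping with a single forward filtering pass over the lines that maintains a shrinking set of still-unmatched parameter names.
import Mathlib
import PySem

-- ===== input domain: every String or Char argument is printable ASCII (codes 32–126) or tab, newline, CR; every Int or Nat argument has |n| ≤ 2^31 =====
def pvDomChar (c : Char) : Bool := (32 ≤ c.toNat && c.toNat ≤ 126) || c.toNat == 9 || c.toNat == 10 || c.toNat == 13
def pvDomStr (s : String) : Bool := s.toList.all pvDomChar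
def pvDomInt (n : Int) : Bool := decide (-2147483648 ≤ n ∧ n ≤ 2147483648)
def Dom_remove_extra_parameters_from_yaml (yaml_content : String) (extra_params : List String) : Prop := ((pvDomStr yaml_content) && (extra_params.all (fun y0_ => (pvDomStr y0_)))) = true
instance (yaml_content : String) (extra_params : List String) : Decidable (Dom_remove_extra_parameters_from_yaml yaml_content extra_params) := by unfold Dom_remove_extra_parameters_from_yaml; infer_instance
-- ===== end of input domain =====

-- B replaces A's per-parameter scans plus reverse-sorted index popping by a single forward
-- filtering pass over the lines with a shrinking set of still-unmatched names (simpler decomposition).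


-- ===== PORT A =====
-- 'param_path.split(".")[-1]' (both Pythons compute it verbatim): split(".") is never
-- empty and the separator "." is never "", so neither .getD default is ever taken
def pvName (param_path : String) : String :=
  (PySem.List.pyGet? ((PySem.Str.split? param_path ".").getD []) (-1)).getD ""

-- inner 'for i, line in enumerate(lines): … break' of A
def pvScanA (param_name : String) : List (Int × String) → Option Int
  | [] => none
  | (i, line) :: rest =>
      let stripped := PySem.Str.strip line
      if PySem.Str.startswith stripped (param_name ++ ":") then some i
      else pvScanA param_name rest

-- body of A's outer 'for param_path in extra_params' loop
def pvStepA (lines : List String) (s : PySem.Set Int) (param_path : String) : PySem.Set Int :=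
  match pvScanA (pvName param_path) (PySem.List.enumerate lines) with
  | some i => PySem.Set.add s i
  | none => s

def remove_extra_parameters_from_yaml (yaml_content : String) (extra_params : List String) : String :=
  if extra_params.isEmpty then yaml_content
  else
    -- split("\n"): separator is non-empty, .getD never taken
    let lines := (PySem.Str.split? yaml_content "\n").getD []
    let lines_to_remove : PySem.Set Int := extra_params.foldl (pvStepA lines) PySem.Set.empty
    let lines' := (PySem.List.sorted lines_to_remove (fun x => x) true).foldl
        (fun ls line_num =>
          match PySem.List.pop? ls line_num with
          | some r => r.2
          | none => ls)   -- unreachable: every collected index is in range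
        lines
    PySem.Str.join "\n" lines'

-- ===== PORT B =====
-- body of B's single 'for line in yaml_content.split("\n")' loop
def pvStepB (st : PySem.Set String × List String) (line : String) : PySem.Set String × List String :=
  let stripped := PySem.Str.strip line
  let matched := st.1.filter (fun n => PySem.Str.startswith stripped (n ++ ":"))
  if matched.isEmpty then (st.1, st.2 ++ [line])
  else (PySem.Set.diff st.1 matched, st.2)

def remove_extra_parameters_from_yaml_alt (yaml_content : String) (extra_params : List String) : String :=
  if extra_params.isEmpty then yaml_content
  else
    let names : PySem.Set String := PySem.Set.ofList (extra_params.map pvName)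
    let final := ((PySem.Str.split? yaml_content "\n").getD []).foldl pvStepB (names, [])
    PySem.Str.join "\n" final.2

-- ===== PRECONDITION & SPEC =====
def Spec_remove_extra_parameters_from_yaml (yaml_content : String) (extra_params : List String) (out : String) : Prop := out = remove_extra_parameters_from_yaml_alt yaml_content extra_params
instance (yaml_content : String) (extra_params : List String) (out : String) : Decidable (Spec_remove_extra_parameters_from_yaml yaml_content extra_params out) := by unfold Spec_remove_extra_parameters_from_yaml; infer_instance

-- ===== CLAIM (what is proved, stated in full; the proofs are below) =====
def Claim_equal_remove_extra_parameters_from_yaml : Prop := ∀ (yaml_content : String) (extra_params : List String), Dom_remove_extra_parameters_from_yaml yaml_content extra_params → Spec_remove_extra_parameters_from_yaml yaml_content extra_params (remove_extra_parameters_from_yaml yaml_content extra_params)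

-- ===== LEMMAS AND PROOFS =====

-- 'the stripped line starts with name:'
def pvMatch (line n : String) : Bool := PySem.Str.startswith (PySem.Str.strip line) (n ++ ":")

-- index of the first matching line (spec form of A's inner scan)
def pvFirst (name : String) : List String → Option Nat
  | [] => none
  | l :: ls => if pvMatch l name then some 0 else (pvFirst name ls).map (· + 1)

-- spec form of B's pass
def pvKeep (R : List String) : List String → List String
  | [] => []
  | l :: ls =>
      let M := R.filter (fun n => pvMatch l n)
      if M.isEmpty then l :: pvKeep R ls
      else pvKeep (PySem.Set.diff R M) ls

-- keep the lines whose position does not satisfy P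
def pvSieve (P : Nat → Bool) : List String → List String
  | [] => []
  | l :: ls => if P 0 then pvSieve (fun k => P (k+1)) ls else l :: pvSieve (fun k => P (k+1)) ls

theorem pvSieve_congr (P Q : Nat → Bool) (ls : List String) (h : ∀ k, P k = Q k) :
    pvSieve P ls = pvSieve Q ls := by
  induction ls generalizing P Q with
  | nil => rfl
  | cons l ls ih =>
      simp only [pvSieve, h 0]
      by_cases hq : Q 0 = true
      · simp [hq, ih _ _ (fun k => h (k+1))]
      · simp [hq, ih _ _ (fun k => h (k+1))]

theorem pvSieve_false (ls : List String) : pvSieve (fun _ => false) ls = ls := by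
  induction ls with
  | nil => rfl
  | cons l ls ih => simpa [pvSieve] using ih

theorem pvFirst_lt (name : String) (ls : List String) (k : Nat)
    (h : pvFirst name ls = some k) : k < ls.length := by
  induction ls generalizing k with
  | nil => simp [pvFirst] at h
  | cons l ls ih =>
      simp only [pvFirst] at h
      split at h
      · cases h; simp
      · cases hf : pvFirst name ls with
        | none => simp [hf] at h
        | some j =>
            simp [hf] at h
            have := ih j hf
            simp only [List.length_cons]; omega

theorem pvScanA_enumerate (name : String) (ls : List String) :
    ∀ s : Int, pvScanA name (PySem.List.enumerate ls s)
      = (pvFirst name ls).map (fun k => s + (k : Int)) := by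
  induction ls with
  | nil => intro s; simp [PySem.List.enumerate_nil, pvScanA, pvFirst]
  | cons l ls ih =>
      intro s
      rw [PySem.List.enumerate_cons]
      simp only [pvScanA, pvFirst, pvMatch]
      split
      · simp
      · rw [ih (s+1)]
        cases pvFirst name ls <;> simp <;> ring

theorem pvCollect_mem (lines : List String) (ps : List String) :
    ∀ (s : PySem.Set Int) (i : Int),
      i ∈ ps.foldl (pvStepA lines) s ↔
        i ∈ s ∨ ∃ p ∈ ps, ∃ k : Nat, pvFirst (pvName p) lines = some k ∧ i = (k : Int) := by
  induction ps with
  | nil => simp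
  | cons p ps ih =>
      intro s i
      simp only [List.foldl_cons, ih]
      have hstep : i ∈ pvStepA lines s p ↔
          i ∈ s ∨ ∃ k : Nat, pvFirst (pvName p) lines = some k ∧ i = (k : Int) := by
        simp only [pvStepA]
        rw [pvScanA_enumerate]
        cases hf : pvFirst (pvName p) lines with
        | none =>
            show i ∈ s ↔ i ∈ s ∨ ∃ k : Nat, (none : Option Nat) = some k ∧ i = (k : Int)
            simp
        | some k =>
            show i ∈ PySem.Set.add s (0 + (k : Int)) ↔
              i ∈ s ∨ ∃ k' : Nat, some k = some k' ∧ i = (k' : Int)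
            rw [PySem.Set.mem_add]
            constructor
            · rintro (h | h)
              · exact Or.inl h
              · exact Or.inr ⟨k, rfl, by omega⟩
            · rintro (h | ⟨k', hk', hi⟩)
              · exact Or.inl h
              · right
                cases hk'
                omega
      rw [hstep]
      constructor
      · rintro ((h | h) | h)
        · exact Or.inl h
        · exact Or.inr ⟨p, by simp, h⟩
        · obtain ⟨q, hq, h⟩ := h; exact Or.inr ⟨q, by simp [hq], h⟩
      · rintro (h | ⟨q, hq, h⟩)
        · exact Or.inl (Or.inl h)
        · rcases List.mem_cons.mp hq with rfl | hq
          · exact Or.inl (Or.inr h)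
          · exact Or.inr ⟨q, hq, h⟩

theorem pvCollect_nodup (lines : List String) (ps : List String) :
    ∀ s : PySem.Set Int, s.Nodup → (ps.foldl (pvStepA lines) s).Nodup := by
  induction ps with
  | nil => intro s hs; simpa
  | cons p ps ih =>
      intro s hs
      simp only [List.foldl_cons]
      apply ih
      simp only [pvStepA]
      cases pvScanA (pvName p) (PySem.List.enumerate lines) with
      | none => simpa
      | some i => simpa using PySem.Set.nodup_add s i hs

theorem pvSieve_eraseIdx : ∀ (ls : List String) (m : Nat) (P : Nat → Bool),
    m < ls.length → (∀ k, m ≤ k → P k = false) →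
    pvSieve P (ls.eraseIdx m) = pvSieve (fun k => k == m || P k) ls := by
  intro ls
  induction ls with
  | nil => intro m P h; simp at h
  | cons l ls ih =>
      intro m P hm hP
      cases m with
      | zero =>
          have h0 : ∀ k, P k = false := fun k => hP k (Nat.zero_le k)
          simp only [List.eraseIdx_cons_zero, pvSieve]
          rw [pvSieve_congr _ (fun _ => false) _ h0, pvSieve_false,
              pvSieve_congr _ (fun _ => false) _ (fun k => by simp [h0 (k+1)]),
              pvSieve_false]
          simp
      | succ m =>
          simp only [List.eraseIdx_cons_succ, pvSieve]
          have h0 : (0 == m + 1 || P 0) = P 0 := by simp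
          rw [h0]
          have hrec : pvSieve (fun k => P (k+1)) (ls.eraseIdx m)
              = pvSieve (fun k => k+1 == m+1 || P (k+1)) ls := by
            rw [ih m (fun k => P (k+1)) (by simpa using Nat.lt_of_succ_lt_succ hm)
                (fun k hk => hP (k+1) (by omega))]
            exact pvSieve_congr _ _ _ (fun k => by
              by_cases h : k = m <;> simp [h])
          by_cases hp : P 0 = true <;> simp [hp, hrec]

theorem pvPops_eq_sieve : ∀ (ds : List Int) (ls : List String),
    ds.Pairwise (fun a b => b < a) → (∀ d ∈ ds, 0 ≤ d ∧ d < (ls.length : Int)) →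
    ds.foldl (fun ls n => match PySem.List.pop? ls n with
      | some r => r.2
      | none => ls) ls
      = pvSieve (fun k => decide ((k : Int) ∈ ds)) ls := by
  intro ds
  induction ds with
  | nil => intro ls _ _; simp [pvSieve_false]
  | cons d ds ih =>
      intro ls hpw hrange
      obtain ⟨hd0, hdlt⟩ := hrange d (by simp)
      obtain ⟨m, rfl⟩ : ∃ m : Nat, d = (m : Int) := ⟨d.toNat, by omega⟩
      have hm : m < ls.length := by exact_mod_cast hdlt
      have hpop := PySem.List.pop?_natCast ls m hm
      simp only [List.foldl_cons, hpop]
      have hpw' := (List.pairwise_cons.mp hpw).2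
      have hdall := (List.pairwise_cons.mp hpw).1
      rw [ih (ls.eraseIdx m) hpw' (by
        intro e he
        obtain ⟨h1, h2⟩ := hrange e (by simp [he])
        have := hdall e he
        refine ⟨h1, ?_⟩
        rw [List.length_eraseIdx_of_lt hm]; push_cast; omega)]
      rw [pvSieve_eraseIdx ls m _ hm (by
        intro k hk
        simp only [decide_eq_false_iff_not]
        intro hmem
        have := hdall _ hmem
        omega)]
      exact pvSieve_congr _ _ _ (fun k => by
        by_cases h : k = m
        · simp [h]
        · have : ((k : Int) = (m : Int)) ↔ False := by simp [h]
          simp [h, List.mem_cons, this])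

theorem pvSieve_keep : ∀ (ls : List String) (R : List String),
    pvSieve (fun k => decide (∃ n ∈ R, pvFirst n ls = some k)) ls = pvKeep R ls := by
  intro ls
  induction ls with
  | nil => intro R; rfl
  | cons l ls ih =>
      intro R
      have hfirst : ∀ n k, pvFirst n (l :: ls) = some k ↔
          (pvMatch l n = true ∧ k = 0) ∨ (pvMatch l n = false ∧ pvFirst n ls = some (k - 1) ∧ 1 ≤ k) := by
        intro n k
        simp only [pvFirst]
        by_cases h : pvMatch l n = true
        · simp [h]; omega
        · simp only [h, Bool.false_eq_true, if_false]
          cases hf : pvFirst n ls <;> simp [h] <;> omega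
      simp only [pvSieve, pvKeep]
      by_cases hm : (R.filter (fun n => pvMatch l n)).isEmpty = true
      · have hno : ∀ n ∈ R, pvMatch l n = false := by
          intro n hn
          have := List.filter_eq_nil_iff.mp (List.isEmpty_iff.mp hm) n hn
          simpa using this
        have h0 : decide (∃ n ∈ R, pvFirst n (l :: ls) = some 0) = false := by
          simp only [decide_eq_false_iff_not]
          rintro ⟨n, hn, hf⟩
          rcases (hfirst n 0).mp hf with ⟨h, _⟩ | ⟨_, _, h⟩
          · rw [hno n hn] at h; exact absurd h (by simp)
          · omega
        rw [h0]
        simp only [hm, if_true, Bool.false_eq_true, if_false]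
        congr 1
        rw [← ih R]
        apply pvSieve_congr
        intro k
        simp only [decide_eq_decide]
        constructor
        · rintro ⟨n, hn, hf⟩
          rcases (hfirst n (k+1)).mp hf with ⟨_, hk⟩ | ⟨_, h, _⟩
          · omega
          · exact ⟨n, hn, by simpa using h⟩
        · rintro ⟨n, hn, hf⟩
          exact ⟨n, hn, (hfirst n (k+1)).mpr (Or.inr ⟨hno n hn, by simpa using hf, by omega⟩)⟩
      · have hne : R.filter (fun n => pvMatch l n) ≠ [] := fun h => hm (by simp [h])
        obtain ⟨n0, hn0⟩ := List.exists_mem_of_ne_nil _ hne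
        have h0 : decide (∃ n ∈ R, pvFirst n (l :: ls) = some 0) = true := by
          rcases List.mem_filter.mp hn0 with ⟨h1, h2⟩
          simp only [decide_eq_true_eq]
          exact ⟨n0, h1, (hfirst n0 0).mpr (Or.inl ⟨by simpa using h2, rfl⟩)⟩
        rw [h0]
        simp only [hm, if_true, Bool.false_eq_true, if_false]
        rw [← ih (PySem.Set.diff R (R.filter (fun n => pvMatch l n)))]
        apply pvSieve_congr
        intro k
        simp only [decide_eq_decide]
        constructor
        · rintro ⟨n, hn, hf⟩
          rcases (hfirst n (k+1)).mp hf with ⟨_, hk⟩ | ⟨hno, h, _⟩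
          · omega
          · refine ⟨n, ?_, by simpa using h⟩
            rw [PySem.Set.mem_diff]
            exact ⟨hn, fun hmem => by simp [List.mem_filter, hno] at hmem⟩
        · rintro ⟨n, hn, hf⟩
          rw [PySem.Set.mem_diff] at hn
          obtain ⟨hnR, hnM⟩ := hn
          have hno : pvMatch l n = false := by
            by_contra h
            exact hnM (List.mem_filter.mpr ⟨hnR, by simpa using h⟩)
          exact ⟨n, hnR, (hfirst n (k+1)).mpr (Or.inr ⟨hno, by simpa using hf, by omega⟩)⟩

theorem pvFoldB : ∀ (ls : List String) (R : PySem.Set String) (acc : List String),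
    (ls.foldl pvStepB (R, acc)).2 = acc ++ pvKeep R ls := by
  intro ls
  induction ls with
  | nil => intro R acc; simp [pvKeep]
  | cons l ls ih =>
      intro R acc
      simp only [List.foldl_cons, pvKeep]
      show (ls.foldl pvStepB (pvStepB (R, acc) l)).2 = _
      simp only [pvStepB, pvMatch]
      by_cases hm : (R.filter (fun n => PySem.Str.startswith (PySem.Str.strip l) (n ++ ":"))).isEmpty = true
      · simp only [hm, if_true, ih]
        simp [pvMatch, hm]
      · simp only [hm, Bool.false_eq_true, if_false, ih]

-- ===== VERDICT (by name: the statement is the Claim_ definition above) =====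
theorem remove_extra_parameters_from_yaml_spec : Claim_equal_remove_extra_parameters_from_yaml := by
  intro yaml_content extra_params _
  unfold Spec_remove_extra_parameters_from_yaml
  unfold remove_extra_parameters_from_yaml remove_extra_parameters_from_yaml_alt
  by_cases he : extra_params.isEmpty
  · simp [he]
  · simp only [he, Bool.false_eq_true, if_false]
    set lines := (PySem.Str.split? yaml_content "\n").getD [] with hlines
    set S : PySem.Set Int := extra_params.foldl (pvStepA lines) PySem.Set.empty with hS
    set names : PySem.Set String := PySem.Set.ofList (extra_params.map pvName) with hnames
    have hmemS : ∀ i : Int, i ∈ S ↔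
        ∃ p ∈ extra_params, ∃ k : Nat, pvFirst (pvName p) lines = some k ∧ i = (k : Int) := by
      intro i
      rw [hS, pvCollect_mem]
      simp [PySem.Set.empty]
    have hnodupS : S.Nodup := pvCollect_nodup lines extra_params PySem.Set.empty List.nodup_nil
    set ds := PySem.List.sorted S (fun x => x) true with hds
    have hperm : ds.Perm S := PySem.List.sorted_perm S (fun x => x) true
    have hmemds : ∀ i : Int, i ∈ ds ↔ i ∈ S := fun i => hperm.mem_iff
    have hpw : ds.Pairwise (fun a b => b < a) := by
      have h1 : ds.Pairwise (fun a b : Int => b ≤ a) := PySem.List.sorted_pairwise_rev S (fun x => x)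
      have h2 : ds.Nodup := hperm.symm.nodup hnodupS
      exact (h1.and h2).imp (by rintro a b ⟨hle, hne⟩; omega)
    have hrange : ∀ d ∈ ds, 0 ≤ d ∧ d < (lines.length : Int) := by
      intro d hd
      obtain ⟨p, _, k, hk, rfl⟩ := (hmemS d).mp ((hmemds d).mp hd)
      have := pvFirst_lt _ _ _ hk
      exact ⟨Int.natCast_nonneg k, by exact_mod_cast this⟩
    rw [pvPops_eq_sieve ds lines hpw hrange]
    rw [pvSieve_congr _ (fun k => decide (∃ n ∈ names, pvFirst n lines = some k)) lines (by
      intro k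
      simp only [decide_eq_decide]
      rw [hmemds, hmemS]
      constructor
      · rintro ⟨p, hp, k', hk', hkk⟩
        have hk : k = k' := by exact_mod_cast hkk
        subst hk
        exact ⟨pvName p, by rw [hnames, PySem.Set.mem_ofList]; exact List.mem_map_of_mem hp, hk'⟩
      · rintro ⟨n, hn, hk⟩
        rw [hnames, PySem.Set.mem_ofList] at hn
        obtain ⟨p, hp, rfl⟩ := List.mem_map.mp hn
        exact ⟨p, hp, k, hk, rfl⟩)]
    rw [pvSieve_keep lines names]
    have hB := pvFoldB lines names []
    simp only [List.nil_append] at hB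
    rw [hB]
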